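-- pv_equiv track=rewrite | github.com/RitvikKhanna/Playfair-Cipher-Decryption | Solutions/a10.py | corpusFreq
-- ===== SOURCE A (Python) =====
-- def preproc(aString):
--     # convert to uppercase, remove non-alpha chars (keep spaces), split into words
--     s = aString.upper()
--     for c in s:
--         if c not in ' ABCDEFGHIJKLMNOPQRSTUVWXYZ':
--             s = s.replace(c, ' ')
--
--     s = s.split()
--     return s
--
-- def dictToSortedList(dictionary, n):
--     # returns a list of n keys in order of their values, highest to lowest
--     # for tiesbreaking, goes in alphabetical order
--
--     result = []
--     for i in range(len(dictionary)):
--         if n == 0: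
--             break
--         # get the maximum
--         maxkey = ''
--         maxval = -1
--         for item in dictionary:
--             if dictionary[item] > maxval:
--                 # found max
--                 maxkey = item
--                 maxval = dictionary[item]
--             elif dictionary[item] == maxval:
--                 # found something equal to the current max
--                 # tie breaking by alphabetical order
--                 if item < maxkey:
--                     maxkey = item
--         # so that this key will no longer be considered for max
--         dictionary[maxkey] = -2
--         result.append(maxkey)
--
--         n -= 1
--     # return the keys in order
--     return result
--
-- def corpusFreq(corpus,regexList):
--
--     # This method first processes the corpus file and returns
--     # a list of the words
--
--     # The frequencyDict is a dictionary with word as the key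
--     # and the frequency (i.e the count) as the value
--
--     # After getting the frequencyDict we use the dicToSortedList
--     # method to sort it in the order of increasing frequency and
--     # in case of same frequency list them alphabetically
--
--     # The sorted list is then returned
--
--     newCorpus = preproc(corpus)
--
--     frequencyDict = {}
--
--     for word in regexList:
--
--         count = 0
--         for item in newCorpus:
--
--             if word == item:
--                 count = count + 1
--
--         frequencyDict[word]=count
--
--     frequencyDict = dictToSortedList(frequencyDict,len(frequencyDict))
--
--     return frequencyDict
-- ===== SOURCE B (Python) =====
-- def corpusFreq(corpus, regexList):
--     # one-pass word counting + a single key-based sort (replaces A's per-query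
--     # corpus scan and hand-written selection sort)
--     ALPHA = 'ABCDEFGHIJKLMNOPQRSTUVWXYZ'
--     words = ''.join(c if c in ALPHA else ' ' for c in corpus.upper()).split()
--     counts = {}
--     for w in words:
--         counts[w] = counts.get(w, 0) + 1
--     return sorted(dict.fromkeys(regexList), key=lambda w: (-counts.get(w, 0), w))
-- ===== Notes on version B (the rewrite author's own statement) =====
-- stated objective: faster
-- what changed: B builds one word->count dictionary in a single pass over the corpus and sorts the distinct query words once by the key (-count, word), instead of A's rescan of the whole corpus for every query word followed by a hand-written selection sort that rescans the dictionary for each output position.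
import Mathlib
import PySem

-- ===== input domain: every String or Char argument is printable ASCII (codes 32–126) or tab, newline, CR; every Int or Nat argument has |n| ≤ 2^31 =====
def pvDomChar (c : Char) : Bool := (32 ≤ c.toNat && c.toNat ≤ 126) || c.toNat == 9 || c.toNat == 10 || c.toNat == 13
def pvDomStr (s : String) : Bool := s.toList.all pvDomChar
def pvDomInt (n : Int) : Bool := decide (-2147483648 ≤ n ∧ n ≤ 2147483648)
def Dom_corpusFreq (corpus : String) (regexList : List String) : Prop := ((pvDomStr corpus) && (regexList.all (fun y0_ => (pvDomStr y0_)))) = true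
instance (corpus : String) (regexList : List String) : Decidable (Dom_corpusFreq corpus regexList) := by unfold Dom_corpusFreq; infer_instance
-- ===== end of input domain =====

-- B replaces A's per-query corpus rescan and hand-written selection sort by one counting
-- pass over the corpus plus a single key-based sort (same return value).

-- ===== PORT A =====
-- `c in '...'` on a single-character c is ported as list membership (exact for 1-char needles);
-- `dictionary[item]` with item drawn from the dict's own keys is ported as getD _ 0 (the key is present, so exact).
def preproc (aString : String) : List String :=
  let s0 := PySem.Chars.upper aString.toList
  let s1 := s0.foldl (fun s c =>
    if c ∈ " ABCDEFGHIJKLMNOPQRSTUVWXYZ".toList then s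
    else PySem.Chars.replace s [c] [' ']) s0
  (PySem.Chars.split₀ s1).map String.mk

def dictToSortedList (dictionary : PySem.Dict String Int) (n : Int) : List String :=
  let st := (PySem.List.pyRange 0 (dictionary.size : Int) 1).foldl
    (fun (st : PySem.Dict String Int × List String × Int × Bool) _i =>
      if st.2.2.2 then st
      else if st.2.2.1 == 0 then (st.1, st.2.1, st.2.2.1, true)
      else
        let mx := st.1.keys.foldl (fun (mk : String × Int) item =>
          if st.1.getD item 0 > mk.2 then (item, st.1.getD item 0)
          else if st.1.getD item 0 == mk.2 then (if item < mk.1 then (item, mk.2) else mk)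
          else mk) ("", -1)
        (st.1.insert mx.1 (-2), st.2.1 ++ [mx.1], st.2.2.1 - 1, st.2.2.2))
    (dictionary, ([] : List String), n, false)
  st.2.1

def corpusFreq (corpus : String) (regexList : List String) : List String :=
  let newCorpus := preproc corpus
  let frequencyDict := regexList.foldl (fun d word =>
    let count := newCorpus.foldl (fun count item => if word == item then count + 1 else count) (0 : Int)
    d.insert word count) PySem.Dict.empty
  dictToSortedList frequencyDict (frequencyDict.size : Int)

-- ===== PORT B =====
def corpusFreq_alt (corpus : String) (regexList : List String) : List String :=
  let alpha := "ABCDEFGHIJKLMNOPQRSTUVWXYZ".toList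
  let words := (PySem.Chars.split₀
    ((PySem.Chars.upper corpus.toList).map (fun c => if c ∈ alpha then c else ' '))).map String.mk
  let counts := words.foldl (fun d w => d.insert w (d.getD w 0 + 1)) PySem.Dict.empty
  PySem.List.sorted2 (PySem.List.dedup regexList) (fun w => -(counts.getD w 0)) (fun w => w)

-- ===== PRECONDITION & SPEC =====
def Spec_corpusFreq (corpus : String) (regexList : List String) (out : List String) : Prop := out = corpusFreq_alt corpus regexList
instance (corpus : String) (regexList : List String) (out : List String) : Decidable (Spec_corpusFreq corpus regexList out) := by unfold Spec_corpusFreq; infer_instance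

-- ===== CLAIM (what is proved, stated in full; the proofs are below) =====
def Claim_equal_corpusFreq : Prop := ∀ (corpus : String) (regexList : List String), Dom_corpusFreq corpus regexList → Spec_corpusFreq corpus regexList (corpusFreq corpus regexList)

-- ===== LEMMAS AND PROOFS =====

-- replace with a single-char needle is a character substitution
theorem pv_replace_go (c : Char) : ∀ (l : List Char) (fuel : Nat) (acc : List Char),
    l.length ≤ fuel →
    PySem.Chars.replace.go [c] [' '] fuel l acc
      = acc.reverse ++ l.map (fun x => if x = c then ' ' else x) := by
  intro l
  induction l with
  | nil =>
    intro fuel acc _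
    cases fuel <;> simp [PySem.Chars.replace.go]
  | cons x t ih =>
    intro fuel acc h
    cases fuel with
    | zero => simp at h
    | succ fuel =>
      by_cases hx : x = c
      · subst hx
        simp only [PySem.Chars.replace.go, List.isPrefixOf, BEq.rfl, Bool.and_self,
          List.length_cons, List.drop_succ_cons, if_true]
        simp only [List.length_nil, List.drop_zero, List.reverse_nil, List.nil_append,
          List.reverse_singleton, List.singleton_append]
        rw [ih fuel (' ' :: acc) (by simpa using h)]
        simp
      · have hbx : ([c].isPrefixOf (x :: t)) = false := by
          simp [List.isPrefixOf]; exact fun hh => absurd hh.symm hx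
        simp only [PySem.Chars.replace.go, hbx, Bool.false_eq_true, if_false]
        rw [ih fuel (x :: acc) (by simpa using h)]
        simp [hx]

theorem pv_replace_single (s : List Char) (c : Char) :
    PySem.Chars.replace s [c] [' '] = s.map (fun x => if x = c then ' ' else x) := by
  have h := pv_replace_go c s s.length [] (le_refl _)
  simpa [PySem.Chars.replace] using h

-- folding the substitutions over the whole string is a single map
theorem pv_fold_map (A : List Char) : ∀ (l : List Char) (s : List Char),
    l.foldl (fun s c => if c ∈ A then s else s.map (fun x => if x = c then ' ' else x)) s
      = s.map (fun x => l.foldl (fun y c => if c ∈ A then y else if y = c then ' ' else y) x) := by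
  intro l
  induction l with
  | nil => intro s; simp
  | cons c t ih =>
    intro s
    by_cases hc : c ∈ A
    · simp [List.foldl_cons, hc, ih]
    · simp only [List.foldl_cons, hc, if_false]
      rw [ih]
      simp [List.map_map, Function.comp_def]

theorem pv_char_keep (A : List Char) : ∀ (l : List Char) (y : Char), y ∈ A →
    l.foldl (fun y c => if c ∈ A then y else if y = c then ' ' else y) y = y := by
  intro l
  induction l with
  | nil => intro y _; rfl
  | cons c t ih =>
    intro y hy
    by_cases hc : c ∈ A
    · simp only [List.foldl_cons, hc, if_true]; exact ih y hy
    · have : y ≠ c := fun h => hc (h ▸ hy)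
      simp only [List.foldl_cons, hc, if_false, this, if_false]
      exact ih y hy

theorem pv_char_subst (A : List Char) (hsp : ' ' ∈ A) : ∀ (l : List Char) (x : Char), x ∈ l →
    l.foldl (fun y c => if c ∈ A then y else if y = c then ' ' else y) x
      = if x ∈ A then x else ' ' := by
  intro l
  induction l with
  | nil => intro x hx; simp at hx
  | cons c t ih =>
    intro x hx
    by_cases hxA : x ∈ A
    · simp only [hxA, if_true]; exact pv_char_keep A (c :: t) x hxA
    · simp only [hxA, if_false]
      by_cases hc : c ∈ A
      · have hxc : x ≠ c := fun h => hxA (h ▸ hc)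
        have hxt : x ∈ t := by cases hx with
          | head => exact absurd rfl hxc
          | tail _ h => exact h
        simp only [List.foldl_cons, hc, if_true]
        simpa [hxA] using ih x hxt
      · by_cases hxc : x = c
        · simp only [List.foldl_cons, hc, if_false, hxc, if_true]
          exact pv_char_keep A t ' ' hsp
        · have hxt : x ∈ t := by cases hx with
          | head => exact absurd rfl hxc
          | tail _ h => exact h
          simp only [List.foldl_cons, hc, if_false, hxc, if_false]
          simpa [hxA] using ih x hxt

-- both preprocessing pipelines yield the same word list
theorem pv_preproc_eq (corpus : String) :
    preproc corpus
      = (PySem.Chars.split₀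
          ((PySem.Chars.upper corpus.toList).map
            (fun c => if c ∈ "ABCDEFGHIJKLMNOPQRSTUVWXYZ".toList then c else ' '))).map String.mk := by
  have hdef : preproc corpus
      = (PySem.Chars.split₀
          ((PySem.Chars.upper corpus.toList).foldl (fun s c =>
            if c ∈ " ABCDEFGHIJKLMNOPQRSTUVWXYZ".toList then s
            else PySem.Chars.replace s [c] [' ']) (PySem.Chars.upper corpus.toList))).map String.mk := rfl
  rw [hdef]
  congr 1
  congr 1
  have hA : (" ABCDEFGHIJKLMNOPQRSTUVWXYZ".toList)
      = ' ' :: ("ABCDEFGHIJKLMNOPQRSTUVWXYZ".toList) := rfl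
  set u := PySem.Chars.upper corpus.toList with hu
  have h1 : u.foldl (fun s c =>
      if c ∈ " ABCDEFGHIJKLMNOPQRSTUVWXYZ".toList then s
      else PySem.Chars.replace s [c] [' ']) u
      = u.foldl (fun s c =>
      if c ∈ " ABCDEFGHIJKLMNOPQRSTUVWXYZ".toList then s
      else s.map (fun x => if x = c then ' ' else x)) u := by
    apply PySem.List.foldl_congr_mem
    intro s c _
    split_ifs with hc
    · rfl
    · exact pv_replace_single s c
  rw [h1, pv_fold_map]
  apply List.map_congr_left
  intro x hx
  rw [pv_char_subst _ (by rw [hA]; exact List.mem_cons_self) u x hx]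
  by_cases hxa : x ∈ "ABCDEFGHIJKLMNOPQRSTUVWXYZ".toList
  · rw [if_pos (by rw [hA]; exact List.mem_cons_of_mem _ hxa), if_pos hxa]
  · by_cases hxs : x = ' '
    · rw [if_pos (by rw [hA, hxs]; exact List.mem_cons_self), if_neg hxa, hxs]
    · rw [if_neg ?_, if_neg hxa]
      rw [hA]
      intro h
      cases h with
      | head => exact hxs rfl
      | tail _ h => exact hxa h

-- getD through A's insert loop (value depends only on the key)
theorem pv_getD_fold (v : String → Int) : ∀ (l : List String) (d : PySem.Dict String Int) (w : String),
    (l.foldl (fun d a => d.insert a (v a)) d).getD w 0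
      = if w ∈ l then v w else d.getD w 0 := by
  intro l
  induction l with
  | nil => intro d w; simp
  | cons a t ih =>
    intro d w
    rw [List.foldl_cons, ih]
    by_cases hw : w ∈ t
    · simp [hw]
    · rw [PySem.Dict.getD_insert]
      by_cases hwa : w = a <;> simp [hw, hwa]

-- "at least as good" for A's running (maxkey, maxval) pair
def pvLe (p r : String × Int) : Prop := p.2 < r.2 ∨ (p.2 = r.2 ∧ r.1 ≤ p.1)

theorem pvLe_refl (p : String × Int) : pvLe p p := Or.inr ⟨rfl, le_refl _⟩

theorem pvLe_trans {p q r : String × Int} (h1 : pvLe p q) (h2 : pvLe q r) : pvLe p r := by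
  rcases h1 with h1 | ⟨h1, h1'⟩ <;> rcases h2 with h2 | ⟨h2, h2'⟩
  · exact Or.inl (lt_trans h1 h2)
  · exact Or.inl (h2 ▸ h1)
  · exact Or.inl (h1 ▸ h2)
  · exact Or.inr ⟨h1.trans h2, h2'.trans h1'⟩

def pvScan (g : String → Int) (ys : List String) (acc : String × Int) : String × Int :=
  ys.foldl (fun mk item =>
    if g item > mk.2 then (item, g item)
    else if g item == mk.2 then (if item < mk.1 then (item, mk.2) else mk)
    else mk) acc

theorem pvScan_spec (g : String → Int) : ∀ (ys : List String) (acc : String × Int),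
    (pvScan g ys acc = acc ∨ ((pvScan g ys acc).1 ∈ ys ∧ (pvScan g ys acc).2 = g (pvScan g ys acc).1))
    ∧ pvLe acc (pvScan g ys acc)
    ∧ ∀ item ∈ ys, pvLe (item, g item) (pvScan g ys acc) := by
  intro ys
  induction ys with
  | nil =>
    intro acc
    exact ⟨Or.inl rfl, pvLe_refl acc, by intro item h; simp at h⟩
  | cons a t ih =>
    intro acc
    have hstep : pvScan g (a :: t) acc = pvScan g t
        (if g a > acc.2 then (a, g a)
         else if g a == acc.2 then (if a < acc.1 then (a, acc.2) else acc)
         else acc) := rfl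
    set acc' := (if g a > acc.2 then (a, g a)
         else if g a == acc.2 then (if a < acc.1 then (a, acc.2) else acc)
         else acc) with hacc'
    obtain ⟨h1, h2, h3⟩ := ih acc'
    have hgood : acc' = acc ∨ (acc'.1 = a ∧ acc'.2 = g a) := by
      rw [hacc']; split_ifs with c1 c2 c3
      · exact Or.inr ⟨rfl, rfl⟩
      · exact Or.inr ⟨rfl, by simpa using (beq_iff_eq.mp c2).symm⟩
      · exact Or.inl rfl
      · exact Or.inl rfl
    have hle : pvLe acc acc' := by
      rw [hacc']; split_ifs with c1 c2 c3
      · exact Or.inl c1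
      · exact Or.inr ⟨rfl, le_of_lt c3⟩
      · exact pvLe_refl acc
      · exact pvLe_refl acc
    have hlea : pvLe (a, g a) acc' := by
      rw [hacc']; split_ifs with c1 c2 c3
      · exact pvLe_refl _
      · exact Or.inr ⟨(beq_iff_eq.mp c2), le_refl _⟩
      · exact Or.inr ⟨(beq_iff_eq.mp c2), le_of_not_gt c3⟩
      · exact Or.inl (lt_of_not_ge (fun hge => by
          rcases lt_or_eq_of_le hge with h | h
          · exact c1 h
          · exact c2 (beq_iff_eq.mpr h.symm)))
    refine ⟨?_, ?_, ?_⟩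
    · rw [hstep]
      rcases h1 with h1 | ⟨ha, hb⟩
      · rcases hgood with hg | ⟨hg1, hg2⟩
        · exact Or.inl (h1.trans hg)
        · exact Or.inr ⟨by rw [h1, hg1]; exact List.mem_cons_self, by rw [h1, hg1, hg2]⟩
      · exact Or.inr ⟨List.mem_cons_of_mem _ ha, hb⟩
    · rw [hstep]; exact pvLe_trans hle h2
    · intro item hit
      rw [hstep]
      cases hit with
      | head => exact pvLe_trans hlea h2
      | tail _ h => exact h3 item h

def pvOuter (rs : List Int) (st : PySem.Dict String Int × List String × Int × Bool) :
    PySem.Dict String Int × List String × Int × Bool :=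
  rs.foldl
    (fun (st : PySem.Dict String Int × List String × Int × Bool) _i =>
      if st.2.2.2 then st
      else if st.2.2.1 == 0 then (st.1, st.2.1, st.2.2.1, true)
      else
        let mx := st.1.keys.foldl (fun (mk : String × Int) item =>
          if st.1.getD item 0 > mk.2 then (item, st.1.getD item 0)
          else if st.1.getD item 0 == mk.2 then (if item < mk.1 then (item, mk.2) else mk)
          else mk) ("", -1)
        (st.1.insert mx.1 (-2), st.2.1 ++ [mx.1], st.2.2.1 - 1, st.2.2.2)) st

theorem pv_dictToSortedList_eq (d : PySem.Dict String Int) (n : Int) :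
    dictToSortedList d n
      = (pvOuter (PySem.List.pyRange 0 (d.size : Int) 1) (d, [], n, false)).2.1 := rfl

-- A's selection loop emits a strictly (count desc, word asc)-sorted arrangement of the remaining keys
theorem pvOuter_spec (xs : List String) (f : String → Int) (hnd : xs.Nodup)
    (hf : ∀ w ∈ xs, 0 ≤ f w) :
    ∀ (rs : List Int) (R : List String) (d : PySem.Dict String Int) (res : List String),
    rs.length = R.length → R.Nodup → (∀ w ∈ R, w ∈ xs) → d.keys = xs →
    (∀ w ∈ xs, d.getD w 0 = if w ∈ R then f w else -2) →
    ∃ L, (pvOuter rs (d, res, (R.length : Int), false)).2.1 = res ++ L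
      ∧ L.Perm R ∧ L.Pairwise (fun a b => f b < f a ∨ (f b = f a ∧ a < b)) := by
  intro rs
  induction rs with
  | nil =>
    intro R d res hlen _ _ _ _
    exact ⟨[], by simp [pvOuter], by
      have : R = [] := List.eq_nil_of_length_eq_zero hlen.symm
      simp [this], List.Pairwise.nil⟩
  | cons i rs ih =>
    intro R d res hlen hR hRxs hkeys hgetD
    have hRne : R ≠ [] := by
      intro h; subst h; simp at hlen
    have hn0 : (((R.length : Int)) == 0) = false := by
      have : R.length ≠ 0 := fun h => hRne (List.eq_nil_of_length_eq_zero h)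
      simp; omega
    -- the selected maximum
    set g : String → Int := fun item => d.getD item 0 with hg
    set mx := pvScan g d.keys ("", -1) with hmx
    obtain ⟨h1, _, h3⟩ := pvScan_spec g d.keys ("", -1)
    obtain ⟨w0, hw0⟩ := List.exists_mem_of_ne_nil R hRne
    have hw0xs : w0 ∈ xs := hRxs w0 hw0
    have hgw0 : g w0 = f w0 := by rw [hg]; simpa [hw0] using hgetD w0 hw0xs
    have hw0le : pvLe (w0, g w0) mx := h3 w0 (by rw [hkeys]; exact hw0xs)
    have hmx2 : 0 ≤ mx.2 := by
      rcases hw0le with h | ⟨h, _⟩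
      · exact le_of_lt (lt_of_le_of_lt (hgw0 ▸ hf w0 hw0xs) h)
      · exact h ▸ hgw0 ▸ hf w0 hw0xs
    have hne : ¬ (mx = (("", -1) : String × Int)) := by
      intro h; rw [h] at hmx2; omega
    have hmem : mx.1 ∈ xs ∧ mx.2 = g mx.1 := by
      rcases h1 with h | h
      · exact absurd h hne
      · exact ⟨hkeys ▸ h.1, h.2⟩
    have hmxR : mx.1 ∈ R := by
      by_contra hnotR
      have := hgetD mx.1 hmem.1
      rw [if_neg hnotR] at this
      have hb : g mx.1 = d.getD mx.1 0 := rfl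
      rw [hmem.2, hb, this] at hmx2
      omega
    have hmxf : mx.2 = f mx.1 := by
      have hb : g mx.1 = d.getD mx.1 0 := rfl
      rw [hmem.2, hb]
      simpa [hmxR] using hgetD mx.1 hmem.1
    -- one unfolding step of the outer loop
    have hstep : pvOuter (i :: rs) (d, res, (R.length : Int), false)
        = pvOuter rs (d.insert mx.1 (-2), res ++ [mx.1], (R.length : Int) - 1, false) := by
      simp only [pvOuter, List.foldl_cons, hn0, Bool.false_eq_true, if_false]
      rfl
    -- set up the IH with R' = R.erase mx.1
    set R' := R.erase mx.1 with hR'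
    have hlen' : (R'.length) = R.length - 1 := List.length_erase_of_mem hmxR
    have hcast : (R.length : Int) - 1 = (R'.length : Int) := by
      rw [hlen']
      have : 1 ≤ R.length := List.length_pos_of_mem hmxR
      omega
    have hcont : d.contains mx.1 = true := (PySem.Dict.contains_iff_mem_keys d mx.1).mpr (hkeys ▸ hmem.1)
    have hkeys' : (d.insert mx.1 (-2)).keys = xs := by
      rw [PySem.Dict.keys_insert_of_contains d _ hcont, hkeys]
    have hgetD' : ∀ w ∈ xs, (d.insert mx.1 (-2)).getD w 0 = if w ∈ R' then f w else -2 := by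
      intro w hw
      rw [PySem.Dict.getD_insert]
      by_cases hwm : w = mx.1
      · subst hwm
        have hn : mx.1 ∉ R' := fun h => absurd rfl ((hR.mem_erase_iff.mp h).1)
        simp [hn]
      · have : w ∈ R' ↔ w ∈ R := by
          rw [hR']; exact ⟨fun h => (hR.mem_erase_iff.mp h).2,
            fun h => hR.mem_erase_iff.mpr ⟨hwm, h⟩⟩
        rw [if_neg hwm, hgetD w hw]
        simp [this]
    obtain ⟨L', hL1, hL2, hL3⟩ := ih R' (d.insert mx.1 (-2)) (res ++ [mx.1])
      (by simp at hlen ⊢; omega) (hR.erase _) (fun w hw => hRxs w (hR.mem_erase_iff.mp hw).2)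
      hkeys' hgetD'
    refine ⟨mx.1 :: L', ?_, ?_, ?_⟩
    · rw [hstep, hcast, hL1]
      simp
    · exact ((hL2.cons mx.1).trans (List.perm_cons_erase hmxR).symm)
    · refine List.Pairwise.cons ?_ hL3
      intro b hb
      have hbR' : b ∈ R' := hL2.mem_iff.mp hb
      have hbR : b ∈ R := (hR.mem_erase_iff.mp hbR').2
      have hbne : b ≠ mx.1 := (hR.mem_erase_iff.mp hbR').1
      have hbxs : b ∈ xs := hRxs b hbR
      have hgb : g b = f b := by rw [hg]; simpa [hbR] using hgetD b hbxs
      have := h3 b (by rw [hkeys]; exact hbxs)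
      rcases this with h | ⟨h, h'⟩
      · exact Or.inl (by rw [← hgb, ← hmxf]; exact h)
      · refine Or.inr ⟨by rw [← hgb, ← hmxf]; exact h, ?_⟩
        exact lt_of_le_of_ne h' (fun hh => hbne hh.symm)

-- sorted2 is sorted under the lexicographic key
theorem pv_sorted2_eq_sorted_lex (xs : List String) (k1 : String → Int) (k2 : String → String) :
    PySem.List.sorted2 xs k1 k2 = PySem.List.sorted xs (fun x => toLex (k1 x, k2 x)) := by
  have hb : (fun (a b : String) => decide (k1 a < k1 b) || (!decide (k1 b < k1 a) && decide (k2 a < k2 b)))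
      = (fun (a b : String) => decide ((toLex (k1 a, k2 a)) < toLex (k1 b, k2 b))) := by
    funext a b
    rcases lt_trichotomy (k1 a) (k1 b) with h | h | h
    · simp [Prod.Lex.lt_iff, h]
    · simp [Prod.Lex.lt_iff, h, lt_irrefl]
    · simp [Prod.Lex.lt_iff, h, lt_asymm h, (ne_of_gt h)]
  simp only [PySem.List.sorted2, PySem.List.sorted, if_neg (by simp : ¬ (false = true))]
  rw [hb]

-- count of a word in the corpus, as A's inner loop computes it
theorem pv_count_fold (W : List String) (word : String) :
    W.foldl (fun count item => if word == item then count + 1 else count) (0 : Int)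
      = (W.count word : Int) := by
  rw [PySem.List.foldl_if_add_one (fun item => word == item) W 0]
  have h : List.countP (fun item => word == item) W = List.count word W := by
    rw [List.count_eq_countP]
    apply List.countP_congr
    intro x _
    simp only [beq_iff_eq]
    exact eq_comm
  rw [h]
  simp

-- ===== VERDICT (by name: the statement is the Claim_ definition above) =====
set_option maxHeartbeats 1000000 in
theorem corpusFreq_spec : Claim_equal_corpusFreq := by
  intro corpus regexList _
  unfold Spec_corpusFreq
  have hBval : corpusFreq_alt corpus regexList
      = PySem.List.sorted2 (PySem.List.dedup regexList)
        (fun w => -((List.foldl (fun d w => d.insert w (d.getD w 0 + 1)) PySem.Dict.empty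
          (List.map String.mk (PySem.Chars.split₀
            (List.map (fun c => if c ∈ "ABCDEFGHIJKLMNOPQRSTUVWXYZ".toList then c else ' ')
              (PySem.Chars.upper corpus.toList))))).getD w 0)) (fun w => w) := rfl
  rw [hBval, ← pv_preproc_eq corpus]
  unfold corpusFreq
  -- the common word list and count function
  set W := preproc corpus with hW
  set f : String → Int := fun w => (W.count w : Int) with hf
  set xs := PySem.List.dedup regexList with hxs
  -- A's dictionary
  set d := regexList.foldl (fun d word =>
    d.insert word (W.foldl (fun count item => if word == item then count + 1 else count) (0 : Int)))
    (PySem.Dict.empty : PySem.Dict String Int) with hd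
  have hkeys : d.keys = xs := by
    rw [hd]
    rw [PySem.Dict.keys_foldl_insert regexList
      (fun d word => W.foldl (fun count item => if word == item then count + 1 else count) (0 : Int)) _]
    simp [PySem.Dict.keys_empty, hxs, PySem.List.dedup_eq_ofList]
    rfl
  have hgetD : ∀ w ∈ xs, d.getD w 0 = f w := by
    intro w hw
    rw [hd, pv_getD_fold]
    have : w ∈ regexList := (PySem.List.mem_dedup regexList w).mp (hxs ▸ hw)
    rw [if_pos this, pv_count_fold]
  have hsize : d.size = xs.length := by
    have h := congrArg List.length hkeys
    simpa [PySem.Dict.keys, PySem.Dict.size] using h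
  -- run the selection loop
  have hlen : (PySem.List.pyRange 0 (d.size : Int) 1).length = xs.length := by
    rw [PySem.List.pyRange_zero_natCast d.size]
    simpa using hsize
  obtain ⟨L, hL1, hL2, hL3⟩ := pvOuter_spec xs f (hxs ▸ PySem.List.nodup_dedup regexList)
    (by intro w _; rw [hf]; positivity)
    (PySem.List.pyRange 0 (d.size : Int) 1) xs d [] hlen
    (hxs ▸ PySem.List.nodup_dedup regexList) (fun w hw => hw) hkeys
    (by intro w hw; rw [hgetD w hw]; simp [hw])
  have hA : dictToSortedList d (d.size : Int) = L := by
    rw [pv_dictToSortedList_eq]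
    have e : (d.size : Int) = ((xs.length : Nat) : Int) := by rw [hsize]
    rw [e] at hL1 ⊢
    rw [hL1]
    simp
  -- B's counts
  have hcounts : (fun w => -((W.foldl (fun d w => d.insert w (d.getD w 0 + 1)) PySem.Dict.empty).getD w 0))
      = fun w => -(f w) := by
    funext w
    rw [PySem.Dict.getD_foldl_insert_add_one W PySem.Dict.empty w]
    simp [hf]
  -- identify both with the lexicographically sorted list
  have hB : PySem.List.sorted2 xs (fun w => -(f w)) (fun w => w) = L := by
    rw [pv_sorted2_eq_sorted_lex]
    apply PySem.List.sorted_eq_of_perm_of_pairwise_lt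
    · exact hL2
    · refine hL3.imp ?_
      intro a b h
      rw [Prod.Lex.lt_iff]
      rcases h with h | ⟨h, h'⟩
      · exact Or.inl (by simpa using h)
      · exact Or.inr ⟨by simpa using h.symm, h'⟩
  rw [hA, hcounts, hB]
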